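-- pv_equiv track=rewrite | github.com/jonathan-ek/advent-of-code-2021 | 03_2.py | get_one_count
-- ===== SOURCE A (Python) =====
-- def get_one_count(data):
--     count = []
--     for d in data:
--         for i, c in enumerate(d):
--             if len(count) <= i:
--                 count.append(0)
--             if c == '1':
--                 count[i] += 1
--     return count
-- ===== SOURCE B (Python) =====
-- def get_one_count(data):
--     width = max((len(d) for d in data), default=0)
--     return [sum(1 for d in data if i < len(d) and d[i] == '1')
--             for i in range(width)]
-- ===== Notes on version B (the rewrite author's own statement) =====
-- stated objective: idiomatic
-- what changed: Row-major loop that grows and mutates a running count list is replaced by a column-major comprehension: compute the maximum row width once, then count '1's per column with a generator sum.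
import Mathlib
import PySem

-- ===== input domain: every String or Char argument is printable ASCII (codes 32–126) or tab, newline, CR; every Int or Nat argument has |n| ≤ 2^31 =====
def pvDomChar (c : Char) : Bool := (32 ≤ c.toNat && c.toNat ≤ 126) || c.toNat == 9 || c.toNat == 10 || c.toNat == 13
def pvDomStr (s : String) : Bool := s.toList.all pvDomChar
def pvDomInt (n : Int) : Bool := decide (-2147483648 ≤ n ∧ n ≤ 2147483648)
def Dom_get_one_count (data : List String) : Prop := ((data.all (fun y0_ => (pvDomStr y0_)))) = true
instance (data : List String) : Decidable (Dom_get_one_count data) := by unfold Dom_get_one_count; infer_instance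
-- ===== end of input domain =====

-- B changes the traversal from row-major mutation of a growing count list to a
-- column-major pass (width first, then count '1' per column); return values agree on all inputs.

-- ===== PORT A =====
/-- A's inner loop body: `if len(count) <= i: count.append(0)`, then `if c == '1': count[i] += 1`. -/
def stepA (count : List Int) (ic : Int × Char) : List Int :=
  let count := if (count.length : Int) ≤ ic.1 then count ++ [(0 : Int)] else count
  if ic.2 == '1' then
    PySem.List.pySetD count ic.1 (PySem.List.pyGetD count ic.1 0 + 1)
  else count

def get_one_count (data : List String) : List Int :=
  data.foldl (fun count d => (PySem.List.enumerate d.toList).foldl stepA count) []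

-- ===== PORT B =====
def get_one_count_alt (data : List String) : List Int :=
  let width := data.foldl (fun m d => max m d.toList.length) 0
  (List.range width).map (fun i =>
    data.foldl (fun acc d =>
      if decide (i < d.toList.length) && (d.toList.getD i ' ' == '1') then acc + 1 else acc)
      (0 : Int))

-- ===== PRECONDITION & SPEC =====
def Spec_get_one_count (data : List String) (out : List Int) : Prop := out = get_one_count_alt data
instance (data : List String) (out : List Int) : Decidable (Spec_get_one_count data out) := by unfold Spec_get_one_count; infer_instance

-- ===== CLAIM (what is proved, stated in full; the proofs are below) =====
def Claim_equal_get_one_count : Prop := ∀ (data : List String), Dom_get_one_count data → Spec_get_one_count data (get_one_count data)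

-- ===== LEMMAS AND PROOFS =====

/-- What one row of A's inner loop does to the count list, written structurally. -/
def addRow : List Int → List Char → List Int
  | count, [] => count
  | [], c :: s => (if c == '1' then (1:Int) else 0) :: addRow [] s
  | x :: count, c :: s => (x + if c == '1' then (1:Int) else 0) :: addRow count s

/-- B's per-row column test, exactly as in the port of B. -/
def bitAt (s : List Char) (i : Nat) : Int :=
  if decide (i < s.length) && (s.getD i ' ' == '1') then 1 else 0

lemma addRow_length (count : List Int) (s : List Char) :
    (addRow count s).length = max count.length s.length := by
  induction s generalizing count with
  | nil => simp [addRow]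
  | cons c s ih =>
    cases count with
    | nil => simp [addRow, ih]
    | cons x t => simp [addRow, ih]; try omega

lemma addRow_getD (count : List Int) (s : List Char) (i : Nat) :
    (addRow count s).getD i 0 = count.getD i 0 + bitAt s i := by
  induction s generalizing count i with
  | nil => simp [addRow, bitAt]
  | cons c s ih =>
    cases count with
    | nil =>
      cases i with
      | zero => simp [addRow, bitAt]
      | succ j => simpa [addRow, bitAt] using ih [] j
    | cons x t =>
      cases i with
      | zero => simp [addRow, bitAt]
      | succ j => simpa [addRow, bitAt] using ih t j

/-- A's inner enumerate-fold, started at index `pre.length` on state `pre ++ rest`,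
    leaves `pre` untouched and acts as `addRow` on `rest`. -/
lemma inner_eq_addRow (s : List Char) (pre rest : List Int) :
    (PySem.List.enumerate s (pre.length : Int)).foldl stepA (pre ++ rest)
    = pre ++ addRow rest s := by
  induction s generalizing pre rest with
  | nil => simp [PySem.List.enumerate_nil, addRow]
  | cons c s ih =>
    rw [PySem.List.enumerate_cons, List.foldl_cons]
    cases rest with
    | nil =>
      have hstep : stepA (pre ++ ([] : List Int)) ((pre.length : Int), c)
          = pre ++ [if c == '1' then (1:Int) else 0] := by
        unfold stepA
        simp only [List.append_nil]
        by_cases hc : c = '1'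
        · simp [hc, PySem.List.pyGetD_natCast, PySem.List.pySetD_natCast,
            List.set_append_right]
        · simp [hc]
      rw [hstep]
      have := ih (pre ++ [if c == '1' then (1:Int) else 0]) []
      simp only [List.append_nil] at this
      have hlen : ((pre ++ [if c == '1' then (1:Int) else 0]).length : Int)
          = (pre.length : Int) + 1 := by simp
      rw [← hlen, this]
      simp [addRow]
    | cons x t =>
      have hstep : stepA (pre ++ x :: t) ((pre.length : Int), c)
          = pre ++ (x + if c == '1' then (1:Int) else 0) :: t := by
        unfold stepA
        have hlt : ¬ ((pre ++ x :: t).length : Int) ≤ (pre.length : Int) := by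
          simp
        by_cases hc : c = '1'
        · simp only [hlt, if_false, hc]
          simp [PySem.List.pyGetD_natCast, PySem.List.pySetD_natCast,
            List.set_append_right]
        · simp [hc]
      rw [hstep]
      have := ih (pre ++ [x + if c == '1' then (1:Int) else 0]) t
      have hlen : ((pre ++ [x + if c == '1' then (1:Int) else 0]).length : Int)
          = (pre.length : Int) + 1 := by simp
      rw [← hlen]
      simp only [List.append_assoc, List.singleton_append] at this
      rw [this]
      simp [addRow]

lemma getA_eq_foldl_addRow (data : List String) :
    get_one_count data = data.foldl (fun count d => addRow count d.toList) [] := by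
  unfold get_one_count
  apply PySem.List.foldl_congr_mem
  intro count d _
  have := inner_eq_addRow d.toList [] count
  simpa using this

lemma foldl_addRow_length (data : List String) (count : List Int) :
    (data.foldl (fun count d => addRow count d.toList) count).length
      = data.foldl (fun m d => max m d.toList.length) count.length := by
  induction data generalizing count with
  | nil => rfl
  | cons d data ih => simp only [List.foldl_cons, ih, addRow_length]

lemma foldl_addRow_getD (data : List String) (count : List Int) (i : Nat) :
    (data.foldl (fun count d => addRow count d.toList) count).getD i 0
      = count.getD i 0 + data.foldl (fun acc d => acc + bitAt d.toList i) 0 := by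
  induction data generalizing count with
  | nil => simp
  | cons d data ih =>
    simp only [List.foldl_cons, ih, addRow_getD]
    rw [PySem.List.foldl_add data (fun d : String => bitAt d.toList i) 0,
        PySem.List.foldl_add data (fun d : String => bitAt d.toList i) (0 + bitAt d.toList i)]
    ring

-- ===== VERDICT (by name: the statement is the Claim_ definition above) =====
theorem get_one_count_spec : Claim_equal_get_one_count := by
  intro data _
  unfold Spec_get_one_count get_one_count_alt
  rw [getA_eq_foldl_addRow]
  apply List.ext_getElem
  · simp [foldl_addRow_length data []]
  · intro i h1 h2
    have hi : i < data.foldl (fun m d => max m d.toList.length) 0 := by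
      simpa [foldl_addRow_length data []] using h1
    have := foldl_addRow_getD data [] i
    rw [List.getD_eq_getElem _ _ h1] at this
    rw [this]
    simp only [List.getElem_map, List.getElem_range]
    have : data.foldl (fun acc d => acc + bitAt d.toList i) 0
        = data.foldl (fun acc d =>
            if decide (i < d.toList.length) && (d.toList.getD i ' ' == '1') then acc + 1 else acc)
          (0 : Int) := by
      apply PySem.List.foldl_congr_mem
      intro acc d _
      unfold bitAt
      split <;> simp
    simp [this]
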